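-- pv_equiv track=rewrite | github.com/kenrollins/gemma-forge | gemma_forge/harness/tools/vuls.py | is_reboot_required_advisory
-- ===== SOURCE A (Python) =====
-- _REBOOT_REQUIRED_PACKAGES = {
--     "kernel", "kernel-core", "kernel-modules", "kernel-modules-core",
--     "kernel-modules-extra", "kernel-tools", "kernel-tools-libs",
--     "kernel-headers", "kpatch", "kpatch-dnf",
--     "glibc", "glibc-common", "glibc-minimal-langpack",
--     "glibc-langpack-en", "glibc-gconv-extra",
--     "systemd", "systemd-libs", "systemd-pam", "systemd-udev",
--     "systemd-resolved", "systemd-networkd",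
--     "dbus", "dbus-broker", "dbus-common", "dbus-libs",
-- }
--
-- def is_reboot_required_advisory(affected_packages: list[str]) -> bool:
--     """True if any affected package requires reboot to activate the upgrade."""
--     for pkg in affected_packages:
--         # Strip version / arch suffixes: "kernel-5.14.0-611.x86_64" -> "kernel"
--         base = pkg.split("-")[0] if "-" in pkg else pkg
--         if base in _REBOOT_REQUIRED_PACKAGES:
--             return True
--         # Also match the fuller package-name prefix (e.g. "kernel-core")
--         for rr_pkg in _REBOOT_REQUIRED_PACKAGES:
--             if pkg.startswith(rr_pkg + "-") or pkg == rr_pkg: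
--                 return True
--     return False
-- ===== SOURCE B (Python) =====
-- _REBOOT_BASE_NAMES = frozenset({"kernel", "kpatch", "glibc", "systemd", "dbus"})
--
-- def is_reboot_required_advisory(affected_packages: list[str]) -> bool:
--     """True if any affected package requires reboot to activate the upgrade.
--
--     A package matches A's 25-entry set (directly or via the startswith scan)
--     exactly when its leading hyphen-component is one of the 5 base names:
--     the leading component is hyphen-free, and the hyphen-free entries of
--     A's set are precisely these five.
--     """
--     return any(pkg.partition("-")[0] in _REBOOT_BASE_NAMES
--                for pkg in affected_packages)
-- ===== Notes on version B (the rewrite author's own statement) =====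
-- stated objective: simpler
-- what changed: B discards A's 25-entry set and the nested startswith scan: it tests the package's leading hyphen-component (pkg.partition('-')[0]) against just the 5 base names kernel/kpatch/glibc/systemd/dbus, which is equivalent because a leading component is hyphen-free and the hyphen-free entries of A's set are exactly those five.
import Mathlib
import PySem

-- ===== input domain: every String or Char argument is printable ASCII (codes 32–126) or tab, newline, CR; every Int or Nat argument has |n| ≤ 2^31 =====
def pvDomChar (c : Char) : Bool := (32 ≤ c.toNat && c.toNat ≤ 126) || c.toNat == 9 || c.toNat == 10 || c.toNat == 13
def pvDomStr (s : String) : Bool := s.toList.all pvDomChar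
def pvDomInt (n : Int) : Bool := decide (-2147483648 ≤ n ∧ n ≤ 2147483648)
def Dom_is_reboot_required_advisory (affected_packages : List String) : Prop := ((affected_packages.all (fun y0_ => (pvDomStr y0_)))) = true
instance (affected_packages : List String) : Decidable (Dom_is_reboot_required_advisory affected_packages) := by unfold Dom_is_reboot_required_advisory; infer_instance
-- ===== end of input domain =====

-- B drops A's 25-entry set and nested startswith scan: it tests the leading
-- hyphen-component against just the 5 base names (objective: simpler; the
-- leading component is hyphen-free and the hyphen-free entries of A's set
-- are exactly those five).

-- ===== PORT A =====
-- the module constant _REBOOT_REQUIRED_PACKAGES (a Python set of distinct literals;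
-- only membership and iteration for a boolean 'any' are used, so a list is exact)
def rebootPkgs : List String :=
  ["kernel", "kernel-core", "kernel-modules", "kernel-modules-core",
   "kernel-modules-extra", "kernel-tools", "kernel-tools-libs",
   "kernel-headers", "kpatch", "kpatch-dnf",
   "glibc", "glibc-common", "glibc-minimal-langpack",
   "glibc-langpack-en", "glibc-gconv-extra",
   "systemd", "systemd-libs", "systemd-pam", "systemd-udev",
   "systemd-resolved", "systemd-networkd",
   "dbus", "dbus-broker", "dbus-common", "dbus-libs"]

-- pkg.split("-")[0]: the separator is nonempty so split? is some, and the result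
-- is always nonempty so [0] never raises; getD/headD are exact here.
def pySplitHead (pkg : String) : String :=
  ((PySem.Str.split? pkg "-").getD []).headD ""

def is_reboot_required_advisory (affected_packages : List String) : Bool :=
  match affected_packages with
  | [] => false
  | pkg :: rest =>
    let base := if PySem.Str.isIn "-" pkg then pySplitHead pkg else pkg
    if rebootPkgs.contains base then true
    else if rebootPkgs.any (fun rr => PySem.Str.startswith pkg (rr ++ "-") || pkg == rr) then true
    else is_reboot_required_advisory rest

-- ===== PORT B =====
-- the module constant _REBOOT_BASE_NAMES (distinct literals; only membership is used)
def rebootBases : List String := ["kernel", "kpatch", "glibc", "systemd", "dbus"]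

-- pkg.partition("-")[0]: everything before the first '-' (the whole string if none)
def partitionHead (pkg : String) : String :=
  String.ofList (pkg.toList.takeWhile (fun c => c != '-'))

def is_reboot_required_advisory_alt (affected_packages : List String) : Bool :=
  affected_packages.any (fun pkg => rebootBases.contains (partitionHead pkg))

-- ===== PRECONDITION & SPEC =====
def Spec_is_reboot_required_advisory (affected_packages : List String) (out : Bool) : Prop := out = is_reboot_required_advisory_alt affected_packages
instance (affected_packages : List String) (out : Bool) : Decidable (Spec_is_reboot_required_advisory affected_packages out) := by unfold Spec_is_reboot_required_advisory; infer_instance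

-- ===== CLAIM (what is proved, stated in full; the proofs are below) =====
def Claim_equal_is_reboot_required_advisory : Prop := ∀ (affected_packages : List String), Dom_is_reboot_required_advisory affected_packages → Spec_is_reboot_required_advisory affected_packages (is_reboot_required_advisory affected_packages)

-- ===== LEMMAS AND PROOFS =====

-- once something has been pushed onto the accumulator, the head of splitOn.go's
-- result is the first element pushed
theorem go_headD_acc (sep : List Char) :
    ∀ (fuel : Nat) (l cur : List Char) (acc : List (List Char)) (x d : List Char),
      (PySem.Chars.splitOn.go sep fuel l cur (acc ++ [x])).headD d = x := by
  intro fuel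
  induction fuel with
  | zero =>
    intro l cur acc x d
    simp [PySem.Chars.splitOn.go, List.reverse_append]
  | succ n ih =>
    intro l cur acc x d
    cases l with
    | nil => simp [PySem.Chars.splitOn.go, List.reverse_append]
    | cons c rest =>
      simp only [PySem.Chars.splitOn.go]
      split
      · have h2 : PySem.Chars.splitOn.go sep n (List.drop sep.length (c :: rest)) []
            (cur.reverse :: (acc ++ [x]))
            = PySem.Chars.splitOn.go sep n (List.drop sep.length (c :: rest)) []
            ((cur.reverse :: acc) ++ [x]) := by simp
        rw [h2, ih]
      · exact ih rest (c :: cur) acc x d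

-- head of s.split('-') is the maximal hyphen-free prefix of s
theorem go_headD_takeWhile :
    ∀ (fuel : Nat) (l cur : List Char) (d : List Char), l.length < fuel →
      (PySem.Chars.splitOn.go ['-'] fuel l cur []).headD d
        = cur.reverse ++ l.takeWhile (fun c => !(c == '-')) := by
  intro fuel
  induction fuel with
  | zero => intro l cur d h; omega
  | succ n ih =>
    intro l cur d h
    cases l with
    | nil => simp [PySem.Chars.splitOn.go]
    | cons c rest =>
      simp only [PySem.Chars.splitOn.go]
      by_cases hc : c = '-'
      · have hpre : List.isPrefixOf ['-'] (c :: rest) = true := by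
          simp [List.isPrefixOf, hc]
        simp only [hpre, if_pos]
        have hg := go_headD_acc ['-'] n (List.drop ['-'].length (c :: rest)) [] [] cur.reverse d
        simp only [List.nil_append] at hg
        rw [hg]
        simp [List.takeWhile, hc]
      · have hpre : List.isPrefixOf ['-'] (c :: rest) = false := by
          simp [List.isPrefixOf]; exact fun hh => absurd hh.symm hc
        simp only [hpre, Bool.false_eq_true, if_false]
        rw [ih rest (c :: cur) d (by simpa using Nat.lt_of_succ_lt_succ h)]
        have hcb : (c == '-') = false := beq_false_of_ne hc
        simp [List.takeWhile, hcb]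

-- headD commutes with map when the default is in the image
theorem headD_map (l : List (List Char)) (d : List Char) :
    (l.map String.ofList).headD (String.ofList d) = String.ofList (l.headD d) := by
  cases l <;> rfl

theorem pySplitHead_eq (pkg : String) :
    pySplitHead pkg = String.ofList (pkg.toList.takeWhile (fun c => !(c == '-'))) := by
  unfold pySplitHead
  rw [show PySem.Str.split? pkg "-"
      = Option.map (fun x => List.map String.ofList x) (PySem.Chars.split? pkg.toList ['-'])
      from rfl]
  simp only [PySem.Chars.split?, List.isEmpty_cons, Bool.false_eq_true, if_false,
    Option.map_some, Option.getD_some]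
  rw [show ("" : String) = String.ofList [] from rfl, headD_map]
  unfold PySem.Chars.splitOn
  rw [go_headD_takeWhile (pkg.toList.length + 1) pkg.toList [] [] (by omega)]
  simp

-- the two heads coincide: partition's predicate c != '-' is !(c == '-')
theorem partitionHead_eq_pySplitHead (pkg : String) :
    partitionHead pkg = pySplitHead pkg := by
  rw [pySplitHead_eq]; rfl

-- a hyphen-free list is its own hyphen-free prefix
theorem takeWhile_eq_self_of_not_mem (l : List Char) (h : '-' ∉ l) :
    l.takeWhile (fun c => !(c == '-')) = l := by
  induction l with
  | nil => rfl
  | cons c t ih =>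
    simp only [List.mem_cons, not_or] at h
    have hc : (c == '-') = false := beq_false_of_ne (fun hh => h.1 hh.symm)
    simp [List.takeWhile, hc, ih h.2]

-- the hyphen-free prefix of (p ++ t) is that of p whenever p contains a hyphen
theorem takeWhile_append_of_mem (p t : List Char) (h : '-' ∈ p) :
    (p ++ t).takeWhile (fun c => !(c == '-')) = p.takeWhile (fun c => !(c == '-')) := by
  induction p with
  | nil => simp at h
  | cons c q ih =>
    by_cases hc : c = '-'
    · simp [List.takeWhile, hc]
    · have hq : '-' ∈ q := by
        rcases List.mem_cons.mp h with h1 | h2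
        · exact absurd h1.symm hc
        · exact h2
      have hcb : (c == '-') = false := beq_false_of_ne hc
      simp [List.takeWhile, hcb, ih hq]

-- the hyphen-free prefix contains no hyphen
theorem not_mem_takeWhile (l : List Char) :
    '-' ∉ l.takeWhile (fun c => !(c == '-')) := by
  intro hm
  have := List.mem_takeWhile_imp hm
  simp at this

-- the hyphen-free entries of A's set are exactly B's 5 base names
theorem rebootPkgs_filter :
    rebootPkgs.filter (fun x => !x.toList.contains '-') = rebootBases := by decide

-- on hyphen-free strings, membership in A's set and in B's base set agree
theorem contains_hyphenfree (t : List Char) (h : '-' ∉ t) :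
    rebootPkgs.contains (String.ofList t) = rebootBases.contains (String.ofList t) := by
  rw [← rebootPkgs_filter]
  by_cases hm : String.ofList t ∈ rebootPkgs
  · simp [hm, h]
  · simp [hm]

-- the set is closed under taking the leading hyphen-component: for every entry rr,
-- both its own leading component and that of any "rr-..." package are entries
theorem rebootPkgs_closed :
    rebootPkgs.all (fun rr =>
      rebootPkgs.contains (String.ofList ((rr.toList ++ ['-']).takeWhile (fun c => !(c == '-'))))
      && rebootPkgs.contains (pySplitHead rr)) = true := by decide

-- A's per-package test succeeds exactly when the leading component is in A's set
theorem per_pkg_iff (pkg : String) :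
    (if rebootPkgs.contains (if PySem.Str.isIn "-" pkg then pySplitHead pkg else pkg) then true
     else if rebootPkgs.any (fun rr => PySem.Str.startswith pkg (rr ++ "-") || pkg == rr) then true
     else false)
    = rebootPkgs.contains (pySplitHead pkg) := by
  have hbase : (if PySem.Str.isIn "-" pkg then pySplitHead pkg else pkg) = pySplitHead pkg := by
    by_cases hin : PySem.Str.isIn "-" pkg = true
    · rw [if_pos hin]
    · rw [if_neg hin]
      have hfalse : PySem.Chars.isIn ['-'] pkg.toList = false := by
        have h0 : PySem.Str.isIn "-" pkg = false := Bool.of_not_eq_true hin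
        simpa [PySem.Str.isIn] using h0
      have hnin : '-' ∉ pkg.toList := by
        intro hm
        exact (PySem.Chars.isIn_eq_false_iff ['-'] pkg.toList).mp hfalse
          ((List.singleton_infix_iff '-' pkg.toList).mpr hm)
      rw [pySplitHead_eq, takeWhile_eq_self_of_not_mem _ hnin]
      simp
  rw [hbase]
  by_cases h1 : rebootPkgs.contains (pySplitHead pkg) = true
  · rw [if_pos h1, h1]
  · rw [if_neg h1]
    have h1' : rebootPkgs.contains (pySplitHead pkg) = false := Bool.of_not_eq_true h1
    -- the inner scan cannot succeed when the leading component is not in the set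
    have hany : rebootPkgs.any
        (fun rr => PySem.Str.startswith pkg (rr ++ "-") || pkg == rr) = false := by
      by_contra hne
      obtain ⟨rr, hmem, hrr⟩ := List.any_eq_true.mp (Bool.of_not_eq_false hne)
      have hclosed := List.all_eq_true.mp rebootPkgs_closed rr hmem
      obtain ⟨hcl1, hcl2⟩ := (Bool.and_eq_true _ _).mp hclosed
      rcases Bool.or_eq_true_iff.mp hrr with hsw | heq
      · -- pkg starts with rr ++ "-": its leading component is rr's leading component
        have hsw' : PySem.Chars.startswith pkg.toList (rr.toList ++ ['-']) = true := by
          rw [show PySem.Str.startswith pkg (rr ++ "-")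
              = PySem.Chars.startswith pkg.toList (rr.toList ++ ['-']) from by simp] at hsw
          exact hsw
        obtain ⟨t, ht⟩ := (PySem.Chars.startswith_iff _ _).mp hsw'
        have htok : pySplitHead pkg
            = String.ofList ((rr.toList ++ ['-']).takeWhile (fun c => !(c == '-'))) := by
          rw [pySplitHead_eq, ← ht,
            takeWhile_append_of_mem (rr.toList ++ ['-']) t (by simp)]
        rw [htok, hcl1] at h1'
        exact absurd h1' (by simp)
      · have hpk : pkg = rr := beq_iff_eq.mp heq
        rw [hpk, hcl2] at h1'
        exact absurd h1' (by simp)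
    rw [if_neg (by rw [hany]; simp)]
    exact h1'.symm

-- A's per-package test equals B's: A's-set membership of the head transfers to the bases
theorem per_pkg_alt (pkg : String) :
    rebootPkgs.contains (pySplitHead pkg) = rebootBases.contains (partitionHead pkg) := by
  rw [partitionHead_eq_pySplitHead, pySplitHead_eq]
  exact contains_hyphenfree _ (not_mem_takeWhile pkg.toList)

theorem ab_eq : ∀ (l : List String),
    is_reboot_required_advisory l = is_reboot_required_advisory_alt l := by
  intro l
  induction l with
  | nil => rfl
  | cons pkg rest ih =>
    have hp := (per_pkg_iff pkg).trans (per_pkg_alt pkg)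
    unfold is_reboot_required_advisory is_reboot_required_advisory_alt
    simp only [List.any_cons]
    by_cases h1 : rebootPkgs.contains
        (if PySem.Str.isIn "-" pkg then pySplitHead pkg else pkg) = true
    · rw [if_pos h1] at hp ⊢
      rw [← hp]
      simp
    · rw [if_neg h1] at hp ⊢
      by_cases h2 : rebootPkgs.any
          (fun rr => PySem.Str.startswith pkg (rr ++ "-") || pkg == rr) = true
      · rw [if_pos h2] at hp ⊢
        rw [← hp]
        simp
      · rw [if_neg h2] at hp ⊢
        rw [← hp, ih]
        simp [is_reboot_required_advisory_alt]

-- ===== VERDICT (by name: the statement is the Claim_ definition above) =====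
theorem is_reboot_required_advisory_spec : Claim_equal_is_reboot_required_advisory := by
  intro l _
  unfold Spec_is_reboot_required_advisory
  exact ab_eq l
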